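-- pv_equiv track=rewrite | github.com/lukassykora/randomForestRules | randomForest.py | get_divided_rules
-- ===== SOURCE A (Python) =====
-- def get_divided_rules(no_dummies_rules):
--     divided_rules = []
--     for new_rule in no_dummies_rules:  # nove pravidlo
--         part_rule = [{}]
--         for key, value in new_rule.items():  # atribut a jeho hodnoty
--             part_list = []
--             for val in value:  # hodnoty
--                 for part in part_rule:
--                     part_dict = part.copy()  # kopiruj soucasnou cast pravidla
--                     if val != "nan":
--                         part_dict[key] = val
--                         part_list.append(part_dict)
--             part_rule = part_list
--         divided_rules += part_rule
--     return divided_rules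
-- ===== SOURCE B (Python) =====
-- def _product(lists):
--     if not lists:
--         return [[]]
--     rest = _product(lists[1:])
--     return [[x] + t for x in lists[0] for t in rest]
--
--
-- def get_divided_rules(no_dummies_rules):
--     divided_rules = []
--     for rule in no_dummies_rules:
--         keys = list(rule)
--         filtered = [[v for v in rule[k] if v != "nan"] for k in keys]
--         for combo in _product(filtered[::-1]):
--             divided_rules.append(dict(zip(keys, combo[::-1])))
--     return divided_rules
-- ===== Notes on version B (the rewrite author's own statement) =====
-- stated objective: alternative
-- what changed: A rebuilds the whole partial-rule list once per value of every key (three nested loops with dict copies); B computes a recursive Cartesian product of the nan-filtered value lists (in reversed key order so the first key varies fastest) and zips each combination back with the keys.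
import Mathlib
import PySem

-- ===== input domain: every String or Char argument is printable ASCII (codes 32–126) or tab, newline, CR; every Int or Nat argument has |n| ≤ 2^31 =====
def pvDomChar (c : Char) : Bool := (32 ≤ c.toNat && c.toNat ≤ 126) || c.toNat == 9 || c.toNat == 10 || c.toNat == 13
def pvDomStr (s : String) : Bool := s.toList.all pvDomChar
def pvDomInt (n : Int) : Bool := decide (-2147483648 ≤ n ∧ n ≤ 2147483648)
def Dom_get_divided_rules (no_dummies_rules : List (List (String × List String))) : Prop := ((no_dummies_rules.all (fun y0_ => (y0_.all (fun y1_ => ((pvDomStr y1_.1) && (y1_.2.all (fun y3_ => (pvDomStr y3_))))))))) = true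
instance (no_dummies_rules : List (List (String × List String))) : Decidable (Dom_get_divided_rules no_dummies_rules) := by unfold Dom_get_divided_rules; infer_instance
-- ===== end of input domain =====

-- B replaces A's incremental rebuild of the partial-rule list (rebuilt once per value of
-- every key) by a single recursive Cartesian product over the nan-filtered value lists,
-- zipped back with the keys (objective: alternative / idiomatic decomposition).
-- Python dicts are ported as association lists; dict[key]=val on a key not yet present is
-- an append, exact since a Python dict's keys are distinct.

-- ===== PORT A =====
-- literal transliteration: three nested loops building part_list, then divided_rules += part_rule
def get_divided_rules (no_dummies_rules : List (List (String × List String))) : List (List (String × String)) :=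
  no_dummies_rules.foldl (fun divided_rules new_rule =>
    divided_rules ++
      new_rule.foldl (fun part_rule kv =>
        kv.2.foldl (fun part_list val =>
          part_rule.foldl (fun pl part =>
            if val ≠ "nan" then pl ++ [part ++ [(kv.1, val)]] else pl) part_list) [])
        [[]])
    []

-- ===== PORT B =====
-- _product: recursive Cartesian product, first list varies slowest (port of Source B's _product)
def pvProduct (lists : List (List String)) : List (List String) :=
  match lists with
  | [] => [[]]
  | l :: ls => l.flatMap (fun x => (pvProduct ls).map (fun t => x :: t))

def get_divided_rules_alt (no_dummies_rules : List (List (String × List String))) : List (List (String × String)) :=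
  no_dummies_rules.flatMap (fun rule =>
    let keys := rule.map Prod.fst
    let filtered := rule.map (fun kv => kv.2.filter (fun v => v ≠ "nan"))
    (pvProduct filtered.reverse).map (fun combo => keys.zip combo.reverse))

-- ===== PRECONDITION & SPEC =====
def Spec_get_divided_rules (no_dummies_rules : List (List (String × List String))) (out : List (List (String × String))) : Prop := out = get_divided_rules_alt no_dummies_rules
instance (no_dummies_rules : List (List (String × List String))) (out : List (List (String × String))) : Decidable (Spec_get_divided_rules no_dummies_rules out) := by unfold Spec_get_divided_rules; infer_instance

-- ===== CLAIM (what is proved, stated in full; the proofs are below) =====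
def Claim_equal_get_divided_rules : Prop := ∀ (no_dummies_rules : List (List (String × List String))), Dom_get_divided_rules no_dummies_rules → Spec_get_divided_rules no_dummies_rules (get_divided_rules no_dummies_rules)

-- ===== LEMMAS AND PROOFS =====

-- A's one-key step with a general accumulator
lemma stepA_aux (part_rule : List (List (String × String))) (k : String)
    (vs : List String) (acc : List (List (String × String))) :
    vs.foldl (fun part_list val =>
      part_rule.foldl (fun pl part =>
        if val ≠ "nan" then pl ++ [part ++ [(k, val)]] else pl) part_list) acc
    = acc ++ (vs.filter (fun v => v ≠ "nan")).flatMap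
        (fun v => part_rule.map (fun part => part ++ [(k, v)])) := by
  induction vs generalizing acc with
  | nil => simp
  | cons v vs ih =>
    rw [List.foldl_cons,
      PySem.List.foldl_append_ite (p := fun _ => v ≠ "nan")
        (f := fun part => part ++ [(k, v)]), ih]
    by_cases h : v = "nan" <;> simp [h]

-- A's one-key step, in flatMap form
lemma stepA_eq (part_rule : List (List (String × String))) (k : String) (vs : List String) :
    vs.foldl (fun part_list val =>
      part_rule.foldl (fun pl part =>
        if val ≠ "nan" then pl ++ [part ++ [(k, val)]] else pl) part_list) []
    = (vs.filter (fun v => v ≠ "nan")).flatMap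
        (fun v => part_rule.map (fun part => part ++ [(k, v)])) := by
  rw [stepA_aux]
  simp

-- every combo produced by pvProduct has one entry per list
lemma pvProduct_length {lists : List (List String)} {c : List String}
    (h : c ∈ pvProduct lists) : c.length = lists.length := by
  induction lists generalizing c with
  | nil => simp [pvProduct] at h; simp [h]
  | cons l ls ih =>
    simp [pvProduct] at h
    obtain ⟨x, _, t, ht, rfl⟩ := h
    simp [ih ht]

-- per-rule equivalence
lemma perRule_eq (rule : List (String × List String)) :
    rule.foldl (fun part_rule kv =>
      kv.2.foldl (fun part_list val =>
        part_rule.foldl (fun pl part =>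
          if val ≠ "nan" then pl ++ [part ++ [(kv.1, val)]] else pl) part_list) [])
      [[]]
    = (pvProduct ((rule.map (fun kv => kv.2.filter (fun v => v ≠ "nan"))).reverse)).map
        (fun combo => (rule.map Prod.fst).zip combo.reverse) := by
  induction rule using List.reverseRecOn with
  | nil => simp [pvProduct]
  | append_singleton r x ih =>
    rw [List.foldl_append, List.foldl_cons, List.foldl_nil, stepA_eq, ih]
    simp only [List.map_append, List.map_cons, List.map_nil, List.reverse_append,
      List.reverse_cons, List.reverse_nil, List.nil_append, List.cons_append,
      pvProduct, List.map_flatMap]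
    apply List.flatMap_congr
    intro v _
    rw [List.map_map, List.map_map]
    apply List.map_congr_left
    intro c hc
    have hlen : c.length = r.length := by
      have := pvProduct_length hc
      simpa using this
    simp only [Function.comp, List.reverse_cons]
    rw [List.zip_append (by simp [hlen])]
    simp

theorem pv_main : ∀ (rs : List (List (String × List String))),
    get_divided_rules rs = get_divided_rules_alt rs := by
  intro rs
  unfold get_divided_rules get_divided_rules_alt
  rw [PySem.List.foldl_append_eq_flatMap]
  rw [List.nil_append]
  apply List.flatMap_congr
  intro rule _
  exact perRule_eq rule

-- ===== VERDICT (by name: the statement is the Claim_ definition above) =====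
theorem get_divided_rules_spec : Claim_equal_get_divided_rules := by
  intro rs _
  unfold Spec_get_divided_rules
  exact pv_main rs
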